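-- pv_equiv track=rewrite | github.com/juwtf/Processamento-Imagem | conv.py | adicionar_padding
-- ===== SOURCE A (Python) =====
-- def adicionar_padding(imagem, pad):
--     altura_imagem = len(imagem)
--     largura_imagem = len(imagem[0])
--
--     imagem_padded = []
--     for _ in range(altura_imagem + 2 * pad):
--         linha_padded = [0] * (largura_imagem + 2 * pad)
--         imagem_padded.append(linha_padded)
--
--     for i in range(altura_imagem):
--         for j in range(largura_imagem):
--             imagem_padded[i + pad][j + pad] = imagem[i][j]
--     return imagem_padded
-- ===== SOURCE B (Python) =====
-- def adicionar_padding(imagem, pad):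
--     altura = len(imagem)
--     largura = len(imagem[0])
--     out = []
--     for _ in range(pad):
--         out.append([0] * (largura + 2 * pad))
--     for i in range(altura):
--         out.append([0] * pad + [imagem[i][j] for j in range(largura)] + [0] * pad)
--     for _ in range(pad):
--         out.append([0] * (largura + 2 * pad))
--     return out
-- ===== Notes on version B (the rewrite author's own statement) =====
-- stated objective: alternative
-- what changed: B builds the padded image in one pass by concatenation (pad zero rows, then each source row as zero-prefix ++ row values ++ zero-suffix, then pad zero rows) instead of allocating a full zero grid and overwriting its interior with a nested double loop of index assignments.
-- outside the precondition, e.g. on adicionar_padding([], 0): A raises IndexError, B raises IndexError; on adicionar_padding([[1, 2], [3]], 0): A raises IndexError, B raises IndexError; on adicionar_padding([[], [], []], -1): A returns [[]], B returns [[], [], []]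
import Mathlib
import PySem

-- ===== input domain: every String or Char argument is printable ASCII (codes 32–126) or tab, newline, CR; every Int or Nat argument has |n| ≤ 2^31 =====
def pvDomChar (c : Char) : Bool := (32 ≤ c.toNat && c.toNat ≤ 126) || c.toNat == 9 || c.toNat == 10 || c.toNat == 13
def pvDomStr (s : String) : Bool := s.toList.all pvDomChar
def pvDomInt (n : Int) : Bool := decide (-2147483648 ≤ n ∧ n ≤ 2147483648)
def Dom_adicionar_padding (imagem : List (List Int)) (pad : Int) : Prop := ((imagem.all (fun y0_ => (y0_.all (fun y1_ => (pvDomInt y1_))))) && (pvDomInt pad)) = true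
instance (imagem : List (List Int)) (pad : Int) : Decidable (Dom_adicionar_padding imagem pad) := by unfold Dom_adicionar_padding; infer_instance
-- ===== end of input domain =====

-- B builds the padded image in one pass by row concatenation instead of A's
-- zero-grid allocation followed by a nested double loop of interior assignments;
-- the objective is an alternative decomposition of the same cost.

-- ===== PORT A =====
-- literal transliteration of A: allocate (altura+2*pad) all-zero rows, then
-- overwrite the interior with a nested index-assignment loop.
def adicionar_padding (imagem : List (List Int)) (pad : Int) : List (List Int) :=
  let altura : Int := (imagem.length : Int)
  let largura : Int := ((PySem.List.pyGetD imagem 0 []).length : Int)   -- len(imagem[0]); empty imagem raises, excluded by Pre_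
  let base : List (List Int) :=
    (PySem.List.pyRange 0 (altura + 2 * pad) 1).foldl
      (fun acc _ => acc ++ [List.replicate (largura + 2 * pad).toNat 0]) []
  (PySem.List.pyRange 0 altura 1).foldl
    (fun g i =>
      (PySem.List.pyRange 0 largura 1).foldl
        (fun g j =>
          PySem.List.pySetD g (i + pad)
            (PySem.List.pySetD (PySem.List.pyGetD g (i + pad) []) (j + pad)
              (PySem.List.pyGetD (PySem.List.pyGetD imagem i []) j 0)))
        g)
    base

-- ===== PORT B =====
-- literal transliteration of B: pad zero rows, then each source row as
-- zero-prefix ++ first `largura` values ++ zero-suffix, then pad zero rows.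
def adicionar_padding_alt (imagem : List (List Int)) (pad : Int) : List (List Int) :=
  let largura : Int := ((PySem.List.pyGetD imagem 0 []).length : Int)   -- len(imagem[0]); empty imagem raises, excluded by Pre_
  let zeros : List (List Int) :=
    List.replicate pad.toNat (List.replicate (largura + 2 * pad).toNat 0)
  zeros
    ++ imagem.map (fun row =>
        List.replicate pad.toNat 0
          ++ (PySem.List.pyRange 0 largura 1).map (fun j => PySem.List.pyGetD row j 0)
          ++ List.replicate pad.toNat 0)
    ++ zeros

-- ===== PRECONDITION & SPEC =====
-- Pre_ excludes: empty imagem and images with a row shorter than the first row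
-- (Python A raises IndexError there), and negative pad — outside the natural
-- domain of a padding amount — where A raises IndexError on every image of
-- nonzero width and, on zero-width images, returns a grid whose row count is
-- shrunk by the negative pad (an artefact of allocating range(altura+2*pad) rows).
def Pre_adicionar_padding (imagem : List (List Int)) (pad : Int) : Prop :=
  imagem ≠ [] ∧ 0 ≤ pad ∧ ∀ row ∈ imagem, (imagem.headD []).length ≤ row.length
instance (imagem : List (List Int)) (pad : Int) : Decidable (Pre_adicionar_padding imagem pad) := by unfold Pre_adicionar_padding; infer_instance

def pvWitness_adicionar_padding : List (List Int) × Int := ([[1, 2], [3, 4]], 1)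

def Spec_adicionar_padding (imagem : List (List Int)) (pad : Int) (out : List (List Int)) : Prop := out = adicionar_padding_alt imagem pad
instance (imagem : List (List Int)) (pad : Int) (out : List (List Int)) : Decidable (Spec_adicionar_padding imagem pad out) := by unfold Spec_adicionar_padding; infer_instance

-- ===== CLAIM (what is proved, stated in full; the proofs are below) =====
def Claim_equal_adicionar_padding : Prop := ∀ (imagem : List (List Int)) (pad : Int), Dom_adicionar_padding imagem pad → Pre_adicionar_padding imagem pad → Spec_adicionar_padding imagem pad (adicionar_padding imagem pad)

-- ===== LEMMAS AND PROOFS =====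

-- composing two in-place updates of the same row
lemma modify_modify_same {α : Type} (g : List α) (r : Nat) (f h : α → α) :
    (g.modify r f).modify r h = g.modify r (fun x => h (f x)) := by
  apply List.ext_getElem (by simp)
  intro i h1 h2
  simp only [List.getElem_modify]
  split <;> rfl

-- `xs[n] = f(xs[n])` written with set/getD is List.modify (both are no-ops out of range)
lemma set_getD_modify {α : Type} (g : List α) (n : Nat) (d : α) (f : α → α) :
    g.set n (f (g.getD n d)) = g.modify n f := by
  rcases Nat.lt_or_ge n g.length with h | h
  · rw [List.modify_eq_set_get f h, List.getD_eq_getElem g d h]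
    rfl
  · rw [List.modify_eq_self h, List.set_eq_of_length_le h]

-- Python's `g[r] = f(g[r])` via set/getD is List.modify (both no-ops out of range)
lemma modify_append_middle {α : Type} (l₁ : List α) (x : α) (l₂ : List α) (f : α → α) :
    (l₁ ++ x :: l₂).modify l₁.length f = l₁ ++ f x :: l₂ := by
  induction l₁ with
  | nil => simp [List.modify]
  | cons a l ih => simpa [List.modify] using ih

-- the inner Python loop only ever touches row r: it is one List.modify of that row
lemma inner_to_modify (r : Nat) (u : Nat → Nat) (v : Nat → Int)
    (g : List (List Int)) (js : List Nat) :
    List.foldl (fun g j => g.set r ((g.getD r []).set (u j) (v j))) g js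
      = g.modify r (fun row => List.foldl (fun row j => row.set (u j) (v j)) row js) := by
  induction js generalizing g with
  | nil =>
      simp only [List.foldl_nil]
      refine (List.ext_getElem (by simp) ?_).symm
      intro i h1 h2
      simp only [List.getElem_modify]
      split <;> rfl
  | cons j js ih =>
      rw [List.foldl_cons, ih, set_getD_modify g r [] (fun row => row.set (u j) (v j)),
        modify_modify_same]
      rfl

-- folding writes at indices p, p+1, …, p+n-1 into a replicate leaves the p-border
lemma fold_modify_replicate {α : Type} (p : Nat) (F : Nat → α → α) (d : α) :
    ∀ (n q : Nat),
      List.foldl (fun g i => g.modify (i + p) (F i)) (List.replicate (p + n + q) d) (List.range n)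
        = List.replicate p d ++ (List.range n).map (fun i => F i d) ++ List.replicate q d
  | 0, q => by
      simp only [List.range_zero, List.map_nil, List.foldl_nil, List.append_nil, Nat.add_zero,
        List.replicate_add]
  | n + 1, q => by
      have hrep : p + (n + 1) + q = p + n + (q + 1) := by omega
      rw [List.range_succ, List.foldl_append, hrep, fold_modify_replicate p F d n (q + 1)]
      simp only [List.foldl_cons, List.foldl_nil, List.replicate_succ]
      have hl : n + p = (List.replicate p d ++ (List.range n).map (fun i => F i d)).length := by
        simp [Nat.add_comm]
      rw [hl, modify_append_middle]
      simp

-- the `(range xs.length).map (fun k => … xs[k] …)` loop is a map over xs itself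
lemma map_range_getD {α β : Type} (xs : List α) (d : α) (f : α → β) :
    (List.range xs.length).map (fun k => f (xs.getD k d)) = xs.map f := by
  apply List.ext_getElem (by simp)
  intro i h1 h2
  have hi : i < xs.length := by simpa using h2
  simp [List.getElem?_eq_getElem hi]

-- a loop that only appends a fixed row builds a replicate
lemma foldl_append_const {α : Type} (c : List Int) (l : List α) :
    ∀ acc : List (List Int), List.foldl (fun acc (_ : α) => acc ++ [c]) acc l
      = acc ++ List.replicate l.length c := by
  induction l with
  | nil => simp
  | cons a l ih =>
      intro acc
      rw [List.foldl_cons, ih (acc ++ [c])]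
      simp [List.replicate_succ]

lemma adicionar_padding_eq_alt_natCast (imagem : List (List Int)) (p : Nat) :
    adicionar_padding imagem (p : Int) = adicionar_padding_alt imagem (p : Int) := by
  simp only [adicionar_padding, adicionar_padding_alt]
  have hc1 : ((imagem.length : Int) + 2 * (p : Int)) = ((imagem.length + 2 * p : Nat) : Int) := by
    push_cast; ring
  have hc2 : (((PySem.List.pyGetD imagem 0 []).length : Int) + 2 * (p : Int))
      = (((PySem.List.pyGetD imagem 0 []).length + 2 * p : Nat) : Int) := by
    push_cast; ring
  rw [hc1, hc2]
  simp only [Int.toNat_natCast, PySem.List.pyRange_zero_natCast, List.foldl_map, List.map_map,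
    foldl_append_const, List.length_range, List.nil_append,
    Function.comp_def, ← Nat.cast_add, PySem.List.pySetD_natCast, PySem.List.pyGetD_natCast]
  simp only [inner_to_modify]
  have hset : ∀ (row : List Int) (j : Nat) (a : Int),
      row.set (j + p) a = row.modify (j + p) (fun _ => a) := fun row j a => by
    simpa using set_getD_modify row (j + p) 0 (fun _ => a)
  have hrow : ∀ k : Nat,
      List.foldl (fun (row : List Int) (j : Nat) => row.set (j + p) ((imagem.getD k []).getD j 0))
        (List.replicate ((PySem.List.pyGetD imagem 0 []).length + 2 * p) 0)
        (List.range (PySem.List.pyGetD imagem 0 []).length)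
      = List.replicate p 0
          ++ (List.range (PySem.List.pyGetD imagem 0 []).length).map
              (fun j => (imagem.getD k []).getD j 0)
          ++ List.replicate p 0 := by
    intro k
    have h1 : (fun (row : List Int) (j : Nat) => row.set (j + p) ((imagem.getD k []).getD j 0))
        = fun row j => row.modify (j + p) (fun _ => (imagem.getD k []).getD j 0) := by
      funext row j; exact hset row j _
    rw [h1, show (PySem.List.pyGetD imagem 0 []).length + 2 * p
          = p + (PySem.List.pyGetD imagem 0 []).length + p from by omega,
      fold_modify_replicate p (fun j _ => (imagem.getD k []).getD j 0) 0
        (PySem.List.pyGetD imagem 0 []).length p]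
  rw [show imagem.length + 2 * p = p + imagem.length + p from by omega,
    fold_modify_replicate p
      (fun y row => List.foldl (fun row j => row.set (j + p) ((imagem.getD y []).getD j 0)) row
        (List.range (PySem.List.pyGetD imagem 0 []).length))
      (List.replicate ((PySem.List.pyGetD imagem 0 []).length + 2 * p) 0) imagem.length p]
  simp only [hrow]
  rw [← map_range_getD imagem []
    (fun row => List.replicate p 0
      ++ (List.range (PySem.List.pyGetD imagem 0 []).length).map (fun j => row.getD j 0)
      ++ List.replicate p 0)]

-- ===== VERDICT (by name: the statement is the Claim_ definition above) =====
theorem adicionar_padding_spec : Claim_equal_adicionar_padding := by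
  intro imagem pad _ hpre
  obtain ⟨-, hp0, -⟩ := hpre
  obtain ⟨p, rfl⟩ : ∃ p : Nat, pad = (p : Int) := ⟨pad.toNat, (Int.toNat_of_nonneg hp0).symm⟩
  exact adicionar_padding_eq_alt_natCast imagem p
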